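-- pv_equiv track=rewrite | github.com/dhardestylewis/EquivariantAttentionHead | src/analysis/shift_probe.py | build_offsets
-- ===== SOURCE A (Python) =====
-- from typing import Dict, Iterable, List, Optional, Sequence, Tuple
--
-- def build_offsets(shift_values: Sequence[int]) -> List[Tuple[int, int]]:
--     unique = sorted({int(v) for v in shift_values})
--     if 0 not in unique:
--         unique.insert(0, 0)
--
--     offsets = set()
--     for dx in unique:
--         dx_options = [dx] if dx == 0 else [dx, -dx]
--         for dy in unique:
--             dy_options = [dy] if dy == 0 else [dy, -dy]
--             for ox in dx_options:
--                 for oy in dy_options: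
--                     offsets.add((ox, oy))
--     # Remove the zero shift from final list but keep it at the front for reference
--     ordered = sorted(offsets)
--     return ordered
-- ===== SOURCE B (Python) =====
-- def build_offsets(shift_values):
--     # Sort only the nonzero magnitudes, mirror them around 0 to get the axis,
--     # then emit the n*n pairs in one flat indexed loop via divmod.
--     mags = sorted({abs(int(x)) for x in shift_values if int(x) != 0})
--     axis = [-m for m in reversed(mags)] + [0] + mags
--     n = len(axis)
--     return [(axis[i // n], axis[i % n]) for i in range(n * n)]
-- ===== Notes on version B (the rewrite author's own statement) =====
-- stated objective: faster
-- what changed: A sign-expands every unique value inside four nested loops, accumulates a set of n^2 pairs and sorts that pair set at the end; B never touches a pair set or sorts pairs: it sorts only the nonzero magnitudes, mirrors them around 0 into the symmetric axis by list reversal and concatenation, and emits the n*n pairs already in lexicographic order in one flat divmod-indexed pass.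
import Mathlib
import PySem

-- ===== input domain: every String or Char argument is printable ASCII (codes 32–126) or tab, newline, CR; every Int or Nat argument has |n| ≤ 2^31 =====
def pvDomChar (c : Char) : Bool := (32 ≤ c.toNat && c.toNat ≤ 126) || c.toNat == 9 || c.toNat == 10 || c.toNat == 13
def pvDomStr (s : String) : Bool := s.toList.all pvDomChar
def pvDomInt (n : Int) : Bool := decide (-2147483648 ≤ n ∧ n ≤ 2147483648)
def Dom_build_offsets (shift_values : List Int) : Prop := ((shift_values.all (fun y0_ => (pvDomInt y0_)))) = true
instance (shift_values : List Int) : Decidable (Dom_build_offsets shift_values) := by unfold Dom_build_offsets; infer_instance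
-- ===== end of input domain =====

-- B replaces A's nested sign-expansion loops over a pair set (sorted at the end) by: sort only the
-- nonzero magnitudes, mirror them around 0 into the axis, and emit the n*n pairs in one flat
-- divmod-indexed pass with no pair set and no final sort (objective: faster; measured).

-- ===== PORT A =====
def build_offsets (shift_values : List Int) : List (Int × Int) :=
  let unique0 := PySem.List.sorted (PySem.Set.ofList shift_values) (fun x => x) false
  let unique := if (0 : Int) ∈ unique0 then unique0 else PySem.List.insert unique0 0 0
  let offsets : PySem.Set (Int × Int) :=
    unique.foldl (fun offs dx =>
      let dx_options := if dx == 0 then [dx] else [dx, -dx]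
      unique.foldl (fun offs dy =>
        let dy_options := if dy == 0 then [dy] else [dy, -dy]
        dx_options.foldl (fun offs ox =>
          dy_options.foldl (fun offs oy => PySem.Set.add offs (ox, oy)) offs) offs) offs)
      PySem.Set.empty
  PySem.List.sorted2 offsets (fun p => p.1) (fun p => p.2) false

-- ===== PORT B =====
def build_offsets_alt (shift_values : List Int) : List (Int × Int) :=
  let mags := PySem.List.sorted
    (PySem.Set.ofList ((shift_values.filter (fun x => !(x == 0))).map (fun x => |x|)))
    (fun x => x) false
  let axis := mags.reverse.map (fun m => -m) ++ [0] ++ mags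
  let n : Int := axis.length
  (PySem.List.pyRange 0 (n * n) 1).map (fun i =>
    (PySem.List.pyGetD axis (PySem.Int.floordiv i n) 0,
     PySem.List.pyGetD axis (PySem.Int.mod i n) 0))

-- ===== PRECONDITION & SPEC =====
def Spec_build_offsets (shift_values : List Int) (out : List (Int × Int)) : Prop := out = build_offsets_alt shift_values
instance (shift_values : List Int) (out : List (Int × Int)) : Decidable (Spec_build_offsets shift_values out) := by unfold Spec_build_offsets; infer_instance

-- ===== CLAIM (what is proved, stated in full; the proofs are below) =====
def Claim_equal_build_offsets : Prop := ∀ (shift_values : List Int), Dom_build_offsets shift_values → Spec_build_offsets shift_values (build_offsets shift_values)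

-- ===== LEMMAS AND PROOFS =====

-- Python's lexicographic order on int pairs (strict and non-strict), and the Bool test sorted2 uses.
def pvLexLt (a b : Int × Int) : Prop := a.1 < b.1 ∨ (a.1 = b.1 ∧ a.2 < b.2)
def pvLexLe (a b : Int × Int) : Prop := a.1 < b.1 ∨ (a.1 = b.1 ∧ a.2 ≤ b.2)
def pvBefore (a b : Int × Int) : Bool :=
  decide (a.1 < b.1) || (!decide (b.1 < a.1) && decide (a.2 < b.2))

-- proof-side names for the intermediate collections of the two ports
def pvUnique (shift_values : List Int) : List Int :=
  let unique0 := PySem.List.sorted (PySem.Set.ofList shift_values) (fun x => x) false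
  if (0 : Int) ∈ unique0 then unique0 else PySem.List.insert unique0 0 0

def pvOffsets (shift_values : List Int) : PySem.Set (Int × Int) :=
  (pvUnique shift_values).foldl (fun offs dx =>
    let dx_options := if dx == 0 then [dx] else [dx, -dx]
    (pvUnique shift_values).foldl (fun offs dy =>
      let dy_options := if dy == 0 then [dy] else [dy, -dy]
      dx_options.foldl (fun offs ox =>
        dy_options.foldl (fun offs oy => PySem.Set.add offs (ox, oy)) offs) offs) offs)
    PySem.Set.empty

def pvMags (shift_values : List Int) : List Int :=
  PySem.List.sorted
    (PySem.Set.ofList ((shift_values.filter (fun x => !(x == 0))).map (fun x => |x|)))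
    (fun x => x) false

def pvAxis (shift_values : List Int) : List Int :=
  (pvMags shift_values).reverse.map (fun m => -m) ++ [0] ++ pvMags shift_values

-- the flat divmod square of a list, on the Nat side (proof-side normal form of B's output)
def pvSquare (l : List Int) : List (Int × Int) :=
  (List.range (l.length * l.length)).map (fun k => (l.getD (k / l.length) 0, l.getD (k % l.length) 0))

-- generic: membership in a set-accumulating fold, given a membership law for the step
theorem pv_mem_foldl {β : Type} (l : List β) (g : PySem.Set (Int × Int) → β → PySem.Set (Int × Int))
    (P : β → Int × Int → Prop)
    (h : ∀ s b a, a ∈ g s b ↔ a ∈ s ∨ P b a) :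
    ∀ (s : PySem.Set (Int × Int)) (a : Int × Int),
      a ∈ l.foldl g s ↔ a ∈ s ∨ ∃ b ∈ l, P b a := by
  induction l with
  | nil => simp
  | cons x t ih =>
    intro s a
    simp only [List.foldl_cons, ih, h]
    constructor
    · rintro ((hs | hp) | ⟨b, hb, hp⟩)
      · exact Or.inl hs
      · exact Or.inr ⟨x, by simp, hp⟩
      · exact Or.inr ⟨b, by simp [hb], hp⟩
    · rintro (hs | ⟨b, hb, hp⟩)
      · exact Or.inl (Or.inl hs)
      · rcases List.mem_cons.mp hb with h1 | h1
        · exact Or.inl (Or.inr (h1 ▸ hp))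
        · exact Or.inr ⟨b, h1, hp⟩

-- generic: nodup preservation through a fold
theorem pv_nodup_foldl {β : Type} (l : List β) (g : PySem.Set (Int × Int) → β → PySem.Set (Int × Int))
    (h : ∀ s b, List.Nodup s → List.Nodup (g s b)) :
    ∀ (s : PySem.Set (Int × Int)), List.Nodup s → List.Nodup (l.foldl g s) := by
  induction l with
  | nil => exact fun s hs => hs
  | cons x t ih => intro s hs; exact ih _ (h s x hs)

theorem pv_mem_options (dx x : Int) :
    (x ∈ (if dx == 0 then [dx] else [dx, -dx])) ↔ (x = dx ∨ x = -dx) := by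
  by_cases h : dx = 0
  · simp [h]
  · simp [h]

theorem pv_mem_offsets (shift_values : List Int) (a : Int × Int) :
    a ∈ pvOffsets shift_values ↔
      ((∃ dx ∈ pvUnique shift_values, a.1 = dx ∨ a.1 = -dx) ∧
       (∃ dy ∈ pvUnique shift_values, a.2 = dy ∨ a.2 = -dy)) := by
  unfold pvOffsets
  rw [pv_mem_foldl (pvUnique shift_values) _
    (fun dx a => ∃ dy ∈ pvUnique shift_values, (a.1 = dx ∨ a.1 = -dx) ∧ (a.2 = dy ∨ a.2 = -dy))
    (fun s dx a => by
      simp only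
      rw [pv_mem_foldl (pvUnique shift_values) _
        (fun dy a => (a.1 = dx ∨ a.1 = -dx) ∧ (a.2 = dy ∨ a.2 = -dy))
        (fun s dy a => by
          simp only
          rw [pv_mem_foldl _ _
            (fun ox a => a.1 = ox ∧ (a.2 = dy ∨ a.2 = -dy))
            (fun s ox a => by
              simp only
              rw [PySem.Set.mem_foldl_add]
              constructor
              · rintro (hs | ⟨oy, hoy, rfl⟩)
                · exact Or.inl hs
                · exact Or.inr ⟨rfl, (pv_mem_options dy oy).mp hoy⟩
              · rintro (hs | ⟨h1, h2⟩)
                · exact Or.inl hs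
                · exact Or.inr ⟨a.2, (pv_mem_options dy a.2).mpr h2, by simp [← h1]⟩)]
          constructor
          · rintro (hs | ⟨ox, hox, h1, h2⟩)
            · exact Or.inl hs
            · exact Or.inr ⟨h1 ▸ (pv_mem_options dx ox).mp hox, h2⟩
          · rintro (hs | ⟨h1, h2⟩)
            · exact Or.inl hs
            · exact Or.inr ⟨a.1, (pv_mem_options dx a.1).mpr h1, rfl, h2⟩)])]
  simp only [PySem.Set.empty, List.not_mem_nil, false_or]
  constructor
  · rintro ⟨dx, hdx, dy, hdy, h1, h2⟩
    exact ⟨⟨dx, hdx, h1⟩, ⟨dy, hdy, h2⟩⟩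
  · rintro ⟨⟨dx, hdx, h1⟩, ⟨dy, hdy, h2⟩⟩
    exact ⟨dx, hdx, dy, hdy, h1, h2⟩

theorem pv_nodup_offsets (shift_values : List Int) : List.Nodup (pvOffsets shift_values) := by
  unfold pvOffsets
  refine pv_nodup_foldl _ _ (fun s dx hs => ?_) _ (by simp [PySem.Set.empty])
  refine pv_nodup_foldl _ _ (fun s dy hs => ?_) _ hs
  refine pv_nodup_foldl _ _ (fun s ox hs => ?_) _ hs
  exact pv_nodup_foldl _ _ (fun s oy hs => PySem.Set.nodup_add _ _ hs) _ hs

-- x is in the sorted unique list (with 0 ensured) iff it is 0 or one of the shift values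
theorem pv_mem_unique (shift_values : List Int) (x : Int) :
    x ∈ pvUnique shift_values ↔ (x = 0 ∨ x ∈ shift_values) := by
  unfold pvUnique
  have h0 : ∀ y : Int,
      y ∈ PySem.List.sorted (PySem.Set.ofList shift_values) (fun x => x) false ↔ y ∈ shift_values := by
    intro y
    rw [PySem.List.mem_sorted, PySem.Set.mem_ofList]
  by_cases hz : (0 : Int) ∈ PySem.List.sorted (PySem.Set.ofList shift_values) (fun x => x) false
  · rw [if_pos hz, h0]
    constructor
    · exact Or.inr
    · rintro (rfl | h)
      · exact (h0 0).mp hz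
      · exact h
  · rw [if_neg hz]
    have : PySem.List.insert (PySem.List.sorted (PySem.Set.ofList shift_values) (fun x => x) false) 0 0
        = 0 :: PySem.List.sorted (PySem.Set.ofList shift_values) (fun x => x) false := rfl
    rw [this, List.mem_cons, h0]

-- membership in B's sorted magnitude list
theorem pv_mem_mags (shift_values : List Int) (m : Int) :
    m ∈ pvMags shift_values ↔ ∃ u ∈ shift_values, u ≠ 0 ∧ m = |u| := by
  unfold pvMags
  rw [PySem.List.mem_sorted, PySem.Set.mem_ofList]
  simp only [List.mem_map, List.mem_filter]
  constructor
  · rintro ⟨u, ⟨hu, hne⟩, rfl⟩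
    exact ⟨u, hu, by simpa using hne, rfl⟩
  · rintro ⟨u, hu, hne, rfl⟩
    exact ⟨u, ⟨hu, by simpa using hne⟩, rfl⟩

theorem pv_mags_pos (shift_values : List Int) (m : Int) (hm : m ∈ pvMags shift_values) : 0 < m := by
  obtain ⟨u, _, hne, rfl⟩ := (pv_mem_mags shift_values m).mp hm
  exact abs_pos.mpr hne

theorem pv_mags_sorted_lt (shift_values : List Int) : (pvMags shift_values).Pairwise (· < ·) := by
  have hle : (pvMags shift_values).Pairwise (· ≤ ·) :=
    PySem.List.sorted_pairwise _ (fun x => x)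
  have hnd : (pvMags shift_values).Nodup :=
    ((PySem.List.sorted_perm _ _ _).nodup_iff).mpr (PySem.Set.nodup_ofList _)
  exact List.SortedLT.pairwise (List.SortedLE.sortedLT_of_nodup (List.Pairwise.sortedLE hle) hnd)

-- membership in the mirror axis
theorem pv_mem_axis (shift_values : List Int) (x : Int) :
    x ∈ pvAxis shift_values ↔ (x = 0 ∨ ∃ u ∈ shift_values, x = u ∨ x = -u) := by
  unfold pvAxis
  simp only [List.mem_append, List.mem_map, List.mem_reverse, List.mem_singleton]
  constructor
  · rintro ((⟨m, hm, rfl⟩ | rfl) | hm)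
    · obtain ⟨u, hu, _, rfl⟩ := (pv_mem_mags shift_values m).mp hm
      rcases abs_cases u with ⟨h1, _⟩ | ⟨h1, _⟩
      · exact Or.inr ⟨u, hu, Or.inr (by omega)⟩
      · exact Or.inr ⟨u, hu, Or.inl (by omega)⟩
    · exact Or.inl rfl
    · obtain ⟨u, hu, _, rfl⟩ := (pv_mem_mags shift_values x).mp hm
      rcases abs_cases u with ⟨h1, _⟩ | ⟨h1, _⟩
      · exact Or.inr ⟨u, hu, Or.inl (by omega)⟩
      · exact Or.inr ⟨u, hu, Or.inr (by omega)⟩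
  · rintro (rfl | ⟨u, hu, h⟩)
    · exact Or.inl (Or.inr rfl)
    · by_cases hz : u = 0
      · subst hz
        exact Or.inl (Or.inr (by omega))
      · have hmx : |x| ∈ pvMags shift_values := by
          have hxx : |x| = |u| := by rcases h with rfl | rfl <;> simp
          rw [hxx]
          exact (pv_mem_mags shift_values |u|).mpr ⟨u, hu, hz, rfl⟩
        have hxne : x ≠ 0 := by rcases h with rfl | rfl <;> simpa using hz
        rcases lt_or_gt_of_ne hxne with hneg | hpos
        · exact Or.inl (Or.inl ⟨|x|, hmx, by rw [abs_of_neg hneg]; ring⟩)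
        · exact Or.inr (by rwa [abs_of_pos hpos] at hmx)

-- the mirror axis is strictly increasing
theorem pv_axis_sorted_lt (shift_values : List Int) : (pvAxis shift_values).Pairwise (· < ·) := by
  unfold pvAxis
  have hm := pv_mags_sorted_lt shift_values
  rw [List.append_assoc, List.pairwise_append]
  refine ⟨?_, ?_, ?_⟩
  · rw [List.pairwise_map, List.pairwise_reverse]
    exact hm.imp (fun h => by omega)
  · rw [List.singleton_append, List.pairwise_cons]
    exact ⟨fun m hm' => pv_mags_pos shift_values m hm', hm⟩
  · intro a ha b hb
    simp only [List.mem_map, List.mem_reverse] at ha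
    obtain ⟨m, hm', rfl⟩ := ha
    have hmp := pv_mags_pos shift_values m hm'
    rcases List.mem_cons.mp hb with rfl | hb'
    · omega
    · have := pv_mags_pos shift_values b hb'
      omega

-- one coordinate: reachable from A's unique list (value or its negation) iff on B's axis
theorem pv_axis_char (shift_values : List Int) (x : Int) :
    (∃ dx ∈ pvUnique shift_values, x = dx ∨ x = -dx) ↔ x ∈ pvAxis shift_values := by
  rw [pv_mem_axis]
  constructor
  · rintro ⟨dx, hdx, h⟩
    rcases (pv_mem_unique shift_values dx).mp hdx with rfl | hdx'
    · left; omega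
    · right; exact ⟨dx, hdx', h⟩
  · rintro (rfl | ⟨u, hu, h⟩)
    · exact ⟨0, (pv_mem_unique shift_values 0).mpr (Or.inl rfl), Or.inl rfl⟩
    · exact ⟨u, (pv_mem_unique shift_values u).mpr (Or.inr hu), h⟩

-- B's output is the Nat-side divmod square of the axis
theorem pv_alt_eq_square (shift_values : List Int) :
    build_offsets_alt shift_values = pvSquare (pvAxis shift_values) := by
  show (PySem.List.pyRange 0 (((pvAxis shift_values).length : Int) * ((pvAxis shift_values).length : Int)) 1).map _ = _
  rw [show (((pvAxis shift_values).length : Int) * ((pvAxis shift_values).length : Int))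
      = (((pvAxis shift_values).length * (pvAxis shift_values).length : Nat) : Int) by push_cast; ring]
  rw [PySem.List.pyRange_zero_nat, List.map_map]
  unfold pvSquare
  refine List.map_congr_left (fun k _ => ?_)
  rw [Function.comp_apply, PySem.Int.floordiv_natCast, PySem.Int.mod_natCast,
      PySem.List.pyGetD_natCast, PySem.List.pyGetD_natCast]
  rfl

-- membership in the divmod square of a nonempty list
theorem pv_mem_square (l : List Int) (hl : l ≠ []) (a : Int × Int) :
    a ∈ pvSquare l ↔ a.1 ∈ l ∧ a.2 ∈ l := by
  have hN : 0 < l.length := List.length_pos_iff.mpr hl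
  unfold pvSquare
  simp only [List.mem_map, List.mem_range]
  constructor
  · rintro ⟨k, hk, rfl⟩
    have h1 : k / l.length < l.length := Nat.div_lt_iff_lt_mul hN |>.mpr hk
    have h2 : k % l.length < l.length := Nat.mod_lt k hN
    rw [List.getD_eq_getElem l 0 h1, List.getD_eq_getElem l 0 h2]
    exact ⟨List.getElem_mem h1, List.getElem_mem h2⟩
  · rintro ⟨h1, h2⟩
    obtain ⟨j, hj, hx⟩ := List.mem_iff_getElem.mp h1
    obtain ⟨i, hi, hy⟩ := List.mem_iff_getElem.mp h2
    refine ⟨l.length * j + i, ?_, ?_⟩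
    · calc l.length * j + i < l.length * j + l.length := by omega
        _ = l.length * (j + 1) := by ring
        _ ≤ l.length * l.length := Nat.mul_le_mul_left _ (by omega)
    · have hd : (l.length * j + i) / l.length = j := by
        rw [Nat.mul_add_div hN, Nat.div_eq_of_lt hi]
        omega
      have hm : (l.length * j + i) % l.length = i := by
        rw [Nat.mul_add_mod, Nat.mod_eq_of_lt hi]
      rw [hd, hm, List.getD_eq_getElem l 0 hj, List.getD_eq_getElem l 0 hi, hx, hy]

-- the divmod square of a strictly increasing list is strictly lex-increasing
theorem pv_pairwise_square (l : List Int) (hl : l.Pairwise (· < ·)) :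
    (pvSquare l).Pairwise pvLexLt := by
  unfold pvSquare
  rw [List.pairwise_map]
  refine (List.pairwise_lt_range).imp_of_mem ?_
  intro k k' hk hk' hlt
  simp only [List.mem_range] at hk hk'
  rcases Nat.eq_zero_or_pos l.length with h0 | hN
  · rw [h0] at hk
    omega
  have hj' : k' / l.length < l.length := Nat.div_lt_iff_lt_mul hN |>.mpr hk'
  have hj : k / l.length < l.length := Nat.div_lt_iff_lt_mul hN |>.mpr hk
  have hi : k % l.length < l.length := Nat.mod_lt k hN
  have hi' : k' % l.length < l.length := Nat.mod_lt k' hN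
  have hpl := List.pairwise_iff_getElem.mp hl
  have hdle : k / l.length ≤ k' / l.length := Nat.div_le_div_right (le_of_lt hlt)
  rcases lt_or_eq_of_le hdle with hdlt | hdeq
  · refine Or.inl ?_
    show l.getD (k / l.length) 0 < l.getD (k' / l.length) 0
    rw [List.getD_eq_getElem l 0 hj, List.getD_eq_getElem l 0 hj']
    exact hpl _ _ hj hj' hdlt
  · have e1 := Nat.div_add_mod k l.length
    have e2 := Nat.div_add_mod k' l.length
    have hmlt : k % l.length < k' % l.length := by
      have hx : l.length * (k / l.length) = l.length * (k' / l.length) := by rw [hdeq]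
      omega
    refine Or.inr ⟨?_, ?_⟩
    · show l.getD (k / l.length) 0 = l.getD (k' / l.length) 0
      rw [hdeq]
    · show l.getD (k % l.length) 0 < l.getD (k' % l.length) 0
      rw [List.getD_eq_getElem l 0 hi, List.getD_eq_getElem l 0 hi']
      exact hpl _ _ hi hi' hmlt

theorem pv_axis_ne_nil (shift_values : List Int) : pvAxis shift_values ≠ [] := by
  intro h
  have : (0 : Int) ∈ pvAxis shift_values := (pv_mem_axis shift_values 0).mpr (Or.inl rfl)
  rw [h] at this
  exact List.not_mem_nil this

-- insertion-sort machinery for sorted2 with fst/snd keys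
theorem pv_insertBy_nil (x : Int × Int) : PySem.List.insertBy pvBefore x [] = [x] := rfl
theorem pv_insertBy_cons (x y : Int × Int) (ys : List (Int × Int)) :
    PySem.List.insertBy pvBefore x (y :: ys) =
      if pvBefore x y then x :: y :: ys else y :: PySem.List.insertBy pvBefore x ys := rfl

theorem pvBefore_iff (a b : Int × Int) : pvBefore a b = true ↔ pvLexLt a b := by
  simp [pvBefore, pvLexLt]; omega

theorem pv_le_of_not_before (a b : Int × Int) (h : ¬ pvBefore a b = true) : pvLexLe b a := by
  simp [pvBefore] at h; simp [pvLexLe]; omega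

theorem pv_le_of_lt (a b : Int × Int) (h : pvLexLt a b) : pvLexLe a b := by
  simp [pvLexLt] at h; simp [pvLexLe]; omega

theorem pv_le_trans (a b c : Int × Int) (h1 : pvLexLe a b) (h2 : pvLexLe b c) : pvLexLe a c := by
  simp [pvLexLe] at *; omega

theorem pv_pairwise_insertBy (x : Int × Int) (ys : List (Int × Int))
    (h : ys.Pairwise pvLexLe) : (PySem.List.insertBy pvBefore x ys).Pairwise pvLexLe := by
  induction ys with
  | nil => simp [pv_insertBy_nil]
  | cons y t ih =>
    rw [pv_insertBy_cons]
    rcases List.pairwise_cons.mp h with ⟨hy, ht⟩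
    by_cases hb : pvBefore x y = true
    · rw [if_pos hb]
      have hxy : pvLexLe x y := pv_le_of_lt _ _ ((pvBefore_iff x y).mp hb)
      refine List.pairwise_cons.mpr ⟨?_, h⟩
      intro z hz
      rcases List.mem_cons.mp hz with rfl | hz'
      · exact hxy
      · exact pv_le_trans _ _ _ hxy (hy z hz')
    · rw [if_neg hb]
      refine List.pairwise_cons.mpr ⟨?_, ih ht⟩
      intro z hz
      rcases (PySem.List.mem_insertBy _ _ _ _).mp hz with rfl | hz'
      · exact pv_le_of_not_before _ _ hb
      · exact hy z hz'

theorem pv_pairwise_sorted2 (s : List (Int × Int)) :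
    (PySem.List.sorted2 s (fun p : Int × Int => p.1) (fun p => p.2) false).Pairwise pvLexLe := by
  have step : ∀ (l : List (Int × Int)) (acc : List (Int × Int)), acc.Pairwise pvLexLe →
      (l.foldl (fun acc x => PySem.List.insertBy pvBefore x acc) acc).Pairwise pvLexLe := by
    intro l
    induction l with
    | nil => exact fun acc h => h
    | cons v t ih => intro acc h; exact ih _ (pv_pairwise_insertBy _ _ h)
  have e : PySem.List.sorted2 s (fun p : Int × Int => p.1) (fun p => p.2) false =
      s.foldl (fun acc x => PySem.List.insertBy pvBefore x acc) [] := rfl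
  rw [e]
  exact step s [] (by simp)

-- sorting a nodup pair set by (fst, snd) yields THE strictly lex-increasing list with those members
theorem pv_sorted2_eq (s : PySem.Set (Int × Int)) (ys : List (Int × Int))
    (hnd : List.Nodup s) (hys : ys.Pairwise pvLexLt)
    (hmem : ∀ a, a ∈ s ↔ a ∈ ys) :
    PySem.List.sorted2 s (fun p : Int × Int => p.1) (fun p => p.2) false = ys := by
  have hysnd : ys.Nodup :=
    List.Pairwise.imp (fun h heq => by subst heq; simp [pvLexLt] at h) hys
  have hperm : List.Perm s ys := (List.perm_ext_iff_of_nodup hnd hysnd).mpr hmem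
  have h1 : (PySem.List.sorted2 s (fun p : Int × Int => p.1) (fun p => p.2) false).Perm ys :=
    (PySem.List.sorted2_perm s _ _ false).trans hperm
  refine List.Perm.eq_of_pairwise ?_ (pv_pairwise_sorted2 s) (hys.imp (pv_le_of_lt _ _)) h1
  intro a b _ _ hab hba
  simp [pvLexLe] at hab hba
  have : a.1 = b.1 ∧ a.2 = b.2 := by omega
  exact Prod.ext this.1 this.2

-- ===== VERDICT (by name: the statement is the Claim_ definition above) =====
theorem build_offsets_spec : Claim_equal_build_offsets := by
  intro shift_values _
  unfold Spec_build_offsets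
  have eA : build_offsets shift_values =
      PySem.List.sorted2 (pvOffsets shift_values) (fun p : Int × Int => p.1) (fun p => p.2) false := rfl
  rw [eA, pv_alt_eq_square]
  refine pv_sorted2_eq _ _ (pv_nodup_offsets shift_values)
    (pv_pairwise_square _ (pv_axis_sorted_lt shift_values)) ?_
  intro a
  rw [pv_mem_offsets, pv_mem_square _ (pv_axis_ne_nil shift_values)]
  rw [pv_axis_char, pv_axis_char]
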